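-- pv_equiv track=rewrite | github.com/nadavWeisler/IntroToCS | IntroToCS_ex12/ex12/board.py | _line_win
-- ===== SOURCE A (Python) =====
-- def _line_win(lst):
--     """
--     checks if there is 4 "full" cells.
--     :param lst: list of arguments from the board of the game.
--     :return: True of False (if nobody won in this row.
--     """
--     current_item = -1
--     current_item_count = 0
--     item_num = 0
--     for item in lst:
--         if current_item != item:
--             item_num = item
--             current_item = item
--             current_item_count = 0
--
--         if current_item > 0:
--             current_item_count += 1
--
--         if current_item_count == 4:
--             return item
--     return None
-- ===== SOURCE B (Python) =====
-- def _line_win(lst):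
--     for a, b, c, d in zip(lst, lst[1:], lst[2:], lst[3:]):
--         if a > 0 and a == b == c == d:
--             return a
--     return None
-- ===== Notes on version B (the rewrite author's own statement) =====
-- stated objective: simpler
-- what changed: Replaced the running (current_item, count) state machine with an idiomatic sliding-window scan over zip(lst, lst[1:], lst[2:], lst[3:]) that returns the first window of four equal positive cells.
import Mathlib
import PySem

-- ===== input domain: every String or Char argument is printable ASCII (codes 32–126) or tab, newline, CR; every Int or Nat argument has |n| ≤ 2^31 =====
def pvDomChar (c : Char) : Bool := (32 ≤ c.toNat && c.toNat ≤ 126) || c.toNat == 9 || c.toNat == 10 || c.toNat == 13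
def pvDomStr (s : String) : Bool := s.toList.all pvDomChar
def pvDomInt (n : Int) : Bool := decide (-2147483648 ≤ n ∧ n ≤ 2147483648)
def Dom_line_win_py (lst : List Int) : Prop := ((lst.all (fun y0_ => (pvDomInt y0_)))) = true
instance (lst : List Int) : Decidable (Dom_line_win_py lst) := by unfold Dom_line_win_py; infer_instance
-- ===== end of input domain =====

-- B replaces A's running (current_item, count) state machine with an idiomatic
-- sliding-window scan over zip(lst, lst[1:], lst[2:], lst[3:]); same O(n) cost, simpler.


-- ===== PORT A =====
-- loop of A: state = (current_item, current_item_count, item_num), one step per list element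
def lineGo : List Int → Int → Int → Int → Option Int
  | [], _, _, _ => none
  | item :: rest, cur, cnt, num =>
    let s : Int × Int × Int := if cur ≠ item then (item, 0, item) else (cur, cnt, num)
    let cnt2 : Int := if 0 < s.1 then s.2.1 + 1 else s.2.1
    if cnt2 = 4 then some item else lineGo rest s.1 cnt2 s.2.2

def line_win_py (lst : List Int) : Option Int := lineGo lst (-1) 0 0

-- ===== PORT B =====
-- zip(lst, lst[1:], lst[2:], lst[3:]) ; first quadruple with a > 0 ∧ a = b = c = d wins
def line_win_py_alt (lst : List Int) : Option Int :=
  let quads := ((lst.zip (PySem.List.slice lst (some 1) none)).zip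
                  (PySem.List.slice lst (some 2) none)).zip
                  (PySem.List.slice lst (some 3) none)
  (quads.find? (fun q => decide (0 < q.1.1.1 ∧ q.1.1.1 = q.1.1.2 ∧ q.1.1.2 = q.1.2 ∧ q.1.2 = q.2))).map
    (fun q => q.1.1.1)

-- ===== PRECONDITION & SPEC =====
def Spec_line_win_py (lst : List Int) (out : Option Int) : Prop := out = line_win_py_alt lst
instance (lst : List Int) (out : Option Int) : Decidable (Spec_line_win_py lst out) := by unfold Spec_line_win_py; infer_instance

-- ===== CLAIM (what is proved, stated in full; the proofs are below) =====
def Claim_equal_line_win_py : Prop := ∀ (lst : List Int), Dom_line_win_py lst → Spec_line_win_py lst (line_win_py lst)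

-- ===== LEMMAS AND PROOFS =====

-- proof-side structural form of the sliding window
def winS : List Int → Option Int
  | a :: b :: c :: d :: t => if 0 < a ∧ a = b ∧ b = c ∧ c = d then some a else winS (b :: c :: d :: t)
  | _ => none

theorem alt_eq_winS (lst : List Int) : line_win_py_alt lst = winS lst := by
  induction lst with
  | nil => rfl
  | cons x xs ih =>
    rcases xs with _ | ⟨b, _ | ⟨c, _ | ⟨d, t⟩⟩⟩
    · rfl
    · rfl
    · rfl
    · by_cases h : 0 < x ∧ x = b ∧ b = c ∧ c = d
      · obtain ⟨h1, h2, h3, h4⟩ := h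
        subst h2; subst h3; subst h4
        simp [line_win_py_alt, winS, PySem.List.slice_from, List.find?, h1]
      · have e1 : winS (x :: b :: c :: d :: t) = winS (b :: c :: d :: t) := by
          simp [winS, h]
        rw [e1, ← ih]
        simp only [line_win_py_alt]
        rw [PySem.List.slice_from _ (by norm_num), PySem.List.slice_from _ (by norm_num),
            PySem.List.slice_from _ (by norm_num), PySem.List.slice_from _ (by norm_num),
            PySem.List.slice_from _ (by norm_num), PySem.List.slice_from _ (by norm_num)]
        simp only [Int.toNat_one, show Int.toNat 2 = 2 from rfl, show Int.toNat 3 = 3 from rfl,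
          List.drop_succ_cons, List.drop_zero, List.drop, List.zip_cons_cons]
        rw [List.find?_cons_of_neg (by simpa using h)]

theorem winS_neg_head (y : Int) (ys : List Int) (hy : ¬ 0 < y) :
    winS (y :: ys) = winS ys := by
  rcases ys with _ | ⟨b, _ | ⟨c, _ | ⟨d, t⟩⟩⟩ <;> simp [winS, hy]

theorem winS_skip (cur y : Int) (ys : List Int) (k : ℕ) (hk : k ≤ 3) (hne : cur ≠ y) :
    winS (List.replicate k cur ++ y :: ys) = winS (y :: ys) := by
  interval_cases k <;>
    rcases ys with _ | ⟨b, _ | ⟨c, _ | ⟨d, t⟩⟩⟩ <;>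
      simp [winS, List.replicate, hne]

theorem lineGo_eq_winS (l : List Int) : ∀ (k : ℕ) (cur num : Int), k ≤ 3 →
    (1 ≤ k → 0 < cur) → lineGo l cur (k : Int) num = winS (List.replicate k cur ++ l) := by
  induction l with
  | nil =>
    intro k cur num hk _
    interval_cases k <;> simp [lineGo, winS, List.replicate]
  | cons item rest ih =>
    intro k cur num hk hpos
    by_cases hc : cur = item
    · subst hc
      by_cases hp : 0 < cur
      · by_cases h3 : k = 3
        · subst h3
          have : lineGo (cur :: rest) cur ((3 : ℕ) : Int) num = some cur := by
            simp [lineGo, hp]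
          rw [this]
          simp [winS, List.replicate, hp]
        · have hk2 : k ≤ 2 := by omega
          have step : lineGo (cur :: rest) cur (k : Int) num =
              lineGo rest cur ((k : Int) + 1) num := by
            simp only [lineGo, ne_eq, not_true_eq_false, if_false, if_neg (not_not_intro rfl)]
            rw [if_pos hp, if_neg (show ¬ ((k : Int) + 1 = 4) by omega)]
          rw [step]
          have : ((k : Int) + 1) = ((k + 1 : ℕ) : Int) := by push_cast; ring
          rw [this, ih (k + 1) cur num (by omega) (fun _ => hp)]
          congr 1
          simp [List.replicate_succ', List.append_assoc]
      · have hk0 : k = 0 := by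
          by_contra h
          exact hp (hpos (by omega))
        subst hk0
        have step : lineGo (cur :: rest) cur ((0 : ℕ) : Int) num =
            lineGo rest cur 0 num := by
          simp [lineGo, hp]
        rw [step]
        have := ih 0 cur num (by omega) (by omega)
        simp only [List.replicate, List.nil_append] at this ⊢
        rw [show (0 : Int) = ((0 : ℕ) : Int) by simp, this]
        exact (winS_neg_head cur rest hp).symm
    · -- reset branch
      by_cases hp : 0 < item
      · have step : lineGo (item :: rest) cur (k : Int) num =
            lineGo rest item 1 item := by
          simp [lineGo, hc, hp]
        rw [step]
        have := ih 1 item item (by omega) (fun _ => hp)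
        rw [show (1 : Int) = ((1 : ℕ) : Int) by simp, this]
        simp only [List.replicate, List.nil_append, List.cons_append]
        rcases Nat.eq_zero_or_pos k with h0 | h1
        · subst h0; simp [List.replicate]
        · exact (winS_skip cur item rest k hk hc).symm
      · have step : lineGo (item :: rest) cur (k : Int) num =
            lineGo rest item 0 item := by
          simp [lineGo, hc, hp]
        rw [step]
        have := ih 0 item item (by omega) (by omega)
        simp only [List.replicate, List.nil_append] at this
        rw [show (0 : Int) = ((0 : ℕ) : Int) by simp, this]
        rcases Nat.eq_zero_or_pos k with h0 | h1
        · subst h0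
          simp only [List.replicate, List.nil_append]
          exact (winS_neg_head item rest hp).symm
        · rw [winS_skip cur item rest k hk hc]
          exact (winS_neg_head item rest hp).symm

-- ===== VERDICT (by name: the statement is the Claim_ definition above) =====
theorem line_win_py_spec : Claim_equal_line_win_py := by
  intro lst _
  unfold Spec_line_win_py line_win_py
  rw [alt_eq_winS]
  have := lineGo_eq_winS lst 0 (-1) 0 (by omega) (by omega)
  simpa using this
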